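-- pv_equiv track=rewrite | github.com/lewisir/Advent-of-Code-2025 | Day9/aoc_day9.py | find_largest_conforming_rectangle
-- ===== SOURCE A (Python) =====
-- def find_largest_conforming_rectangle(red_tile_locations, adj_ext_points):
--     """find the largest rectangle that can be formed by any two red tiles and is within the shape (part II)"""
--     largest_area = 0
--     for rtl1 in red_tile_locations:
--         for rtl2 in red_tile_locations:
--             if rtl1 != rtl2:
--                 if conforming_rectangle(rtl1, rtl2, adj_ext_points):
--                     area = rectangle_size(rtl1, rtl2)
--                     if area > largest_area:
--                         largest_area = area
--     return largest_area
--
-- def conforming_rectangle(rtl1, rtl2, adj_ext_points):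
--     """Check whether there are any external points within the rectangle and return True if not"""
--     x1, y1 = rtl1
--     x2, y2 = rtl2
--     x_min = min(x1, x2)
--     x_max = max(x1, x2)
--     y_min = min(y1, y2)
--     y_max = max(y1, y2)
--     for point in adj_ext_points:
--         x, y = point
--         if x >= x_min and x <= x_max and y >= y_min and y <= y_max:
--             return False
--     return True
--
-- def rectangle_size(corner1, corner2):
--     """return the area of the rectangle defines by the two corners"""
--     return abs(corner1[0] - corner2[0] + 1) * abs(corner1[1] - corner2[1] + 1)
-- ===== SOURCE B (Python) =====
-- def find_largest_conforming_rectangle(red_tile_locations, adj_ext_points):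
--     """Sort candidate corner pairs by area descending, return the first empty one (early exit)."""
--     def area(p, q):
--         return abs(p[0] - q[0] + 1) * abs(p[1] - q[1] + 1)
--
--     def empty(p, q):
--         x_lo, x_hi = min(p[0], q[0]), max(p[0], q[0])
--         y_lo, y_hi = min(p[1], q[1]), max(p[1], q[1])
--         return all(not (x_lo <= x <= x_hi and y_lo <= y <= y_hi)
--                    for (x, y) in adj_ext_points)
--
--     pairs = [(p, q) for p in red_tile_locations
--                     for q in red_tile_locations if p != q]
--     pairs.sort(key=lambda pq: area(pq[0], pq[1]), reverse=True)
--     for p, q in pairs: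
--         if empty(p, q):
--             return area(p, q)
--     return 0
-- ===== Notes on version B (the rewrite author's own statement) =====
-- stated objective: alternative
-- what changed: Instead of brute-force maximising over all ordered corner pairs, B builds the pair list once, sorts it by area descending and returns the area of the first pair whose rectangle contains no external point (early exit).
import Mathlib
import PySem

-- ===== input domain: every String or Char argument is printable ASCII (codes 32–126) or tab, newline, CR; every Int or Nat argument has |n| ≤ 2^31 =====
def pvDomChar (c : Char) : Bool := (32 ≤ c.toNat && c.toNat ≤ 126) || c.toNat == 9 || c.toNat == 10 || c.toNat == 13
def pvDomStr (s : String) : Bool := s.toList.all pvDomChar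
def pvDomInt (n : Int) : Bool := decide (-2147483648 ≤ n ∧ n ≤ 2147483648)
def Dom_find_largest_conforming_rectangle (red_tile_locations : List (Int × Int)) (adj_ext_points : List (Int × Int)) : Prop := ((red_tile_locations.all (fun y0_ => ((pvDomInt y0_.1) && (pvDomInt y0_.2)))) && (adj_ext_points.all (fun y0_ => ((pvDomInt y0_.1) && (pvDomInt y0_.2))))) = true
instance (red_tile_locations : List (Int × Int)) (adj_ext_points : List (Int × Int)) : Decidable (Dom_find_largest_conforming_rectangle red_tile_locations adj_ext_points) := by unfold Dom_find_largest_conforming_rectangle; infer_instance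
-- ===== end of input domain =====

-- B replaces A's brute-force max over all ordered corner pairs by sort-by-area-descending then first-empty scan (alternative decomposition, early exit).


-- ===== PORT A =====
def conforming_rectangle (rtl1 rtl2 : Int × Int) (adj_ext_points : List (Int × Int)) : Bool :=
  let x_min := min rtl1.1 rtl2.1
  let x_max := max rtl1.1 rtl2.1
  let y_min := min rtl1.2 rtl2.2
  let y_max := max rtl1.2 rtl2.2
  go x_min x_max y_min y_max adj_ext_points
where
  go (x_min x_max y_min y_max : Int) : List (Int × Int) → Bool
  | [] => true
  | (x, y) :: rest =>
    if x ≥ x_min ∧ x ≤ x_max ∧ y ≥ y_min ∧ y ≤ y_max then false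
    else go x_min x_max y_min y_max rest

def rectangle_size (corner1 corner2 : Int × Int) : Int :=
  |corner1.1 - corner2.1 + 1| * |corner1.2 - corner2.2 + 1|

def find_largest_conforming_rectangle (red_tile_locations : List (Int × Int)) (adj_ext_points : List (Int × Int)) : Int :=
  red_tile_locations.foldl (fun largest_area rtl1 =>
    red_tile_locations.foldl (fun largest_area rtl2 =>
      if rtl1 ≠ rtl2 then
        if conforming_rectangle rtl1 rtl2 adj_ext_points then
          let area := rectangle_size rtl1 rtl2
          if area > largest_area then area else largest_area
        else largest_area
      else largest_area) largest_area) 0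

-- ===== PORT B =====
def pairArea (pq : (Int × Int) × (Int × Int)) : Int :=
  |pq.1.1 - pq.2.1 + 1| * |pq.1.2 - pq.2.2 + 1|

def pairEmpty (p q : Int × Int) (adj_ext_points : List (Int × Int)) : Bool :=
  adj_ext_points.all (fun z =>
    !(min p.1 q.1 ≤ z.1 && z.1 ≤ max p.1 q.1 && min p.2 q.2 ≤ z.2 && z.2 ≤ max p.2 q.2))

def find_largest_conforming_rectangle_alt (red_tile_locations : List (Int × Int)) (adj_ext_points : List (Int × Int)) : Int :=
  let pairs := red_tile_locations.flatMap (fun p =>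
    (red_tile_locations.filter (fun q => p ≠ q)).map (fun q => (p, q)))
  let sortedPairs := PySem.List.sorted pairs pairArea true
  match sortedPairs.find? (fun pq => pairEmpty pq.1 pq.2 adj_ext_points) with
  | some pq => pairArea pq
  | none => 0

-- ===== PRECONDITION & SPEC =====
def Spec_find_largest_conforming_rectangle (red_tile_locations : List (Int × Int)) (adj_ext_points : List (Int × Int)) (out : Int) : Prop := out = find_largest_conforming_rectangle_alt red_tile_locations adj_ext_points
instance (red_tile_locations : List (Int × Int)) (adj_ext_points : List (Int × Int)) (out : Int) : Decidable (Spec_find_largest_conforming_rectangle red_tile_locations adj_ext_points out) := by unfold Spec_find_largest_conforming_rectangle; infer_instance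

-- ===== CLAIM (what is proved, stated in full; the proofs are below) =====
def Claim_equal_find_largest_conforming_rectangle : Prop := ∀ (red_tile_locations : List (Int × Int)) (adj_ext_points : List (Int × Int)), Dom_find_largest_conforming_rectangle red_tile_locations adj_ext_points → Spec_find_largest_conforming_rectangle red_tile_locations adj_ext_points (find_largest_conforming_rectangle red_tile_locations adj_ext_points)

-- ===== LEMMAS AND PROOFS =====

-- the two emptiness tests agree
lemma pairEmpty_eq_conforming (p q : Int × Int) (ext : List (Int × Int)) :
    pairEmpty p q ext = conforming_rectangle p q ext := by
  unfold pairEmpty conforming_rectangle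
  induction ext with
  | nil => rfl
  | cons z rest ih =>
    simp only [List.all_cons, conforming_rectangle.go]
    by_cases h : z.1 ≥ min p.1 q.1 ∧ z.1 ≤ max p.1 q.1 ∧ z.2 ≥ min p.2 q.2 ∧ z.2 ≤ max p.2 q.2
    · have hb : (min p.1 q.1 ≤ z.1 && z.1 ≤ max p.1 q.1 && min p.2 q.2 ≤ z.2 && z.2 ≤ max p.2 q.2) = true := by
        simp only [Bool.and_eq_true, decide_eq_true_eq]; omega
      rw [if_pos h, hb]
      simp
    · rw [if_neg h]
      have hb : (!(min p.1 q.1 ≤ z.1 && z.1 ≤ max p.1 q.1 && min p.2 q.2 ≤ z.2 && z.2 ≤ max p.2 q.2)) = true := by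
        simp only [Bool.not_eq_eq_eq_not, Bool.not_true, Bool.and_eq_false_iff, decide_eq_false_iff_not]
        omega
      rw [hb, Bool.true_and, ih]

lemma pairArea_nonneg (pq : (Int × Int) × (Int × Int)) : 0 ≤ pairArea pq :=
  mul_nonneg (abs_nonneg _) (abs_nonneg _)

-- A's inner update is a conditional max
lemma foldl_step_eq_foldl_max (ok : (Int × Int) × (Int × Int) → Bool)
    (l : List ((Int × Int) × (Int × Int))) (a : Int) :
    l.foldl (fun acc pq => if ok pq then (if pairArea pq > acc then pairArea pq else acc) else acc) a
      = ((l.filter ok).map pairArea).foldl max a := by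
  induction l generalizing a with
  | nil => rfl
  | cons x t ih =>
    simp only [List.foldl_cons, List.filter_cons]
    by_cases h : ok x
    · simp only [h, if_pos, List.map_cons, List.foldl_cons, ih]
      congr 1; omega
    · simp [h, ih]

-- fold max over a list of elements all ≤ the accumulator stays put
lemma foldl_max_of_forall_le (l : List Int) (a : Int) (h : ∀ y ∈ l, y ≤ a) :
    l.foldl max a = a := by
  induction l with
  | nil => rfl
  | cons x t ih =>
    simp only [List.foldl_cons]
    rw [max_eq_left (h x (by simp))]
    exact ih (fun y hy => h y (List.mem_cons_of_mem _ hy))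

-- in an area-descending list, the first empty pair's area is the running max of all empty pairs' areas
lemma find_sorted_eq_foldl_max (ok : (Int × Int) × (Int × Int) → Bool)
    (s : List ((Int × Int) × (Int × Int)))
    (hp : s.Pairwise (fun a b => pairArea b ≤ pairArea a)) :
    (match s.find? ok with
      | some pq => pairArea pq
      | none => 0)
      = ((s.filter ok).map pairArea).foldl max 0 := by
  induction s with
  | nil => rfl
  | cons x t ih =>
    rcases List.pairwise_cons.mp hp with ⟨hx, ht⟩
    by_cases h : ok x
    · rw [List.find?_cons_of_pos h]
      simp only [List.filter_cons, h, if_pos, List.map_cons, List.foldl_cons]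
      rw [max_eq_right (pairArea_nonneg x)]
      exact (foldl_max_of_forall_le _ _ (by
        intro y hy
        rcases List.mem_map.mp hy with ⟨pq, hpq, rfl⟩
        exact hx pq (List.mem_of_mem_filter hpq))).symm
    · rw [List.find?_cons_of_neg (by simp [h])]
      simp only [List.filter_cons, h]
      simpa using ih ht

-- fold max 0 is permutation-invariant
lemma foldl_max_perm {l l' : List Int} (h : l.Perm l') :
    l.foldl max 0 = l'.foldl max 0 :=
  h.foldl_eq' (fun x _ y _ z => max_right_comm z x y) 0

-- A's inner loop over rtl2, for a fixed rtl1 = p, is the fold over the mapped filtered pair list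
lemma A_inner_eq (ext : List (Int × Int)) (p : Int × Int) (l : List (Int × Int)) (a : Int) :
    l.foldl (fun largest_area rtl2 =>
        if p ≠ rtl2 then
          if conforming_rectangle p rtl2 ext then
            let area := rectangle_size p rtl2
            if area > largest_area then area else largest_area
          else largest_area
        else largest_area) a
      = ((l.filter (fun q => p ≠ q)).map (fun q => (p, q))).foldl
          (fun acc pq => if conforming_rectangle pq.1 pq.2 ext then
              (if pairArea pq > acc then pairArea pq else acc) else acc) a := by
  induction l generalizing a with
  | nil => rfl
  | cons q t ih =>
    simp only [List.foldl_cons, List.filter_cons, decide_eq_true_eq]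
    by_cases h : p ≠ q
    · rw [if_pos h, if_pos h, List.map_cons, List.foldl_cons]
      exact ih _
    · rw [if_neg h, if_neg h]
      exact ih _

-- A's nested loops are the fold of the conditional max over B's pair list
lemma A_eq_foldl_pairs (red ext : List (Int × Int)) :
    find_largest_conforming_rectangle red ext
      = (red.flatMap (fun p => (red.filter (fun q => p ≠ q)).map (fun q => (p, q)))).foldl
          (fun acc pq => if conforming_rectangle pq.1 pq.2 ext then
              (if pairArea pq > acc then pairArea pq else acc) else acc) 0 := by
  unfold find_largest_conforming_rectangle
  rw [List.foldl_flatMap]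
  exact List.foldl_ext _ _ 0 (fun a p _ => A_inner_eq ext p red a)

lemma A_eq_B (red ext : List (Int × Int)) :
    find_largest_conforming_rectangle red ext = find_largest_conforming_rectangle_alt red ext := by
  unfold find_largest_conforming_rectangle_alt
  set pairs := red.flatMap (fun p => (red.filter (fun q => p ≠ q)).map (fun q => (p, q))) with hpairs
  set s := PySem.List.sorted pairs pairArea true with hs
  have hok : (fun pq : (Int × Int) × (Int × Int) => pairEmpty pq.1 pq.2 ext)
      = (fun pq => conforming_rectangle pq.1 pq.2 ext) := by
    funext pq; exact pairEmpty_eq_conforming pq.1 pq.2 ext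
  rw [A_eq_foldl_pairs, foldl_step_eq_foldl_max, hok]
  rw [find_sorted_eq_foldl_max _ s (PySem.List.sorted_pairwise_rev ..)]
  exact foldl_max_perm ((((PySem.List.sorted_perm ..).filter _).map _).symm)

-- ===== VERDICT (by name: the statement is the Claim_ definition above) =====
theorem find_largest_conforming_rectangle_spec : Claim_equal_find_largest_conforming_rectangle := by
  intro red ext _
  exact A_eq_B red ext
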